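-- pv_equiv track=rewrite | github.com/rowangame/funny_math | funny_math/solve_24.py | histSymbols
-- ===== SOURCE A (Python) =====
-- def histSymbols(exp):
--     CON_SYMS = ["+", "-", "*", "/"]
--     rlts = [0] * len(CON_SYMS)
--     for index in range(len(CON_SYMS)):
--         tmpSym = CON_SYMS[index]
--         tmpCnt = 0
--         for tmpC in exp:
--             if tmpC == tmpSym:
--                 tmpCnt += 1
--         rlts[index] = tmpCnt
--     totalSys = 0
--     for tmpCnt in rlts:
--         totalSys += tmpCnt
--     return rlts, totalSys
-- ===== SOURCE B (Python) =====
-- def histSymbols(exp):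
--     cnt = {}
--     for c in exp:
--         cnt[c] = cnt.get(c, 0) + 1
--     rlts = [cnt.get(s, 0) for s in "+-*/"]
--     return rlts, sum(rlts)
-- ===== Notes on version B (the rewrite author's own statement) =====
-- stated objective: idiomatic
-- what changed: Replaces A's four full scans of the expression (one per symbol) by a single pass that builds a character-count dictionary, then reads the four counts from the table and sums them.
import Mathlib
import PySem

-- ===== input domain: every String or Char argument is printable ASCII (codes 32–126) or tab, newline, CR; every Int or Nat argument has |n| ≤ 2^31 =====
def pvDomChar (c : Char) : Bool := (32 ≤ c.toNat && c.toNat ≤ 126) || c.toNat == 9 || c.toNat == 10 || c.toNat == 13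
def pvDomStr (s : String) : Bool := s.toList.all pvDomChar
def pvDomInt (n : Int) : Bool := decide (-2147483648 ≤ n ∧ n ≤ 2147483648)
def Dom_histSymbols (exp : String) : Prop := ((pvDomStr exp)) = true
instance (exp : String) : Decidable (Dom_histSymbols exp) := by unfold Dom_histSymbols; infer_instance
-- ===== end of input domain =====

-- B replaces A's four full scans of the string (one per symbol) by one pass building a
-- character-count dictionary, then reads the four counts and sums them (idiomatic rewrite).


-- ===== PORT A =====
-- A: for each of the four symbols, scan the whole string counting matches; then sum the list.
def histSymbols (exp : String) : List Int × Int :=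
  let CON_SYMS : List Char := ['+', '-', '*', '/']
  let rlts : List Int :=
    CON_SYMS.map (fun tmpSym =>
      exp.toList.foldl (fun tmpCnt tmpC => if tmpC = tmpSym then tmpCnt + 1 else tmpCnt) (0 : Int))
  let totalSys : Int := rlts.foldl (fun acc tmpCnt => acc + tmpCnt) 0
  (rlts, totalSys)

-- ===== PORT B =====
-- B: one pass building a count dictionary (cnt[c] = cnt.get(c,0)+1), then table lookups.
def histSymbols_alt (exp : String) : List Int × Int :=
  let cnt : PySem.Dict Char Int :=
    exp.toList.foldl (fun d c => d.modify c 0 (· + 1)) PySem.Dict.empty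
  let rlts : List Int := "+-*/".toList.map (fun s => cnt.getD s 0)
  (rlts, rlts.sum)

-- ===== PRECONDITION & SPEC =====
def Spec_histSymbols (exp : String) (out : List Int × Int) : Prop := out = histSymbols_alt exp
instance (exp : String) (out : List Int × Int) : Decidable (Spec_histSymbols exp out) := by unfold Spec_histSymbols; infer_instance

-- ===== CLAIM =====
def Claim_equal_histSymbols : Prop := ∀ (exp : String), Dom_histSymbols exp → Spec_histSymbols exp (histSymbols exp)

-- ===== LEMMAS AND PROOFS =====
-- A's inner counting loop computes List.count (as an Int).
theorem countLoop_eq (cs : List Char) (s : Char) (a : Int) :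
    cs.foldl (fun tmpCnt tmpC => if tmpC = s then tmpCnt + 1 else tmpCnt) a
      = a + (cs.count s : Int) := by
  induction cs generalizing a with
  | nil => simp
  | cons c cs ih =>
    by_cases h : c = s <;> simp [h, ih]; ring

-- B's dictionary lookup is the count of the character in the string.
theorem dictLookup_eq (cs : List Char) (s : Char) :
    (cs.foldl (fun d c => d.modify c 0 (· + 1)) PySem.Dict.empty).getD s 0
      = (cs.count s : Int) := by
  rw [← PySem.Dict.counter_eq_foldl]
  exact PySem.Dict.getD_counter cs s

-- ===== VERDICT =====
theorem histSymbols_spec : Claim_equal_histSymbols := by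
  intro exp _
  unfold Spec_histSymbols histSymbols histSymbols_alt
  simp only [List.map_cons, List.map_nil, countLoop_eq, dictLookup_eq, zero_add]
  have h : ("+-*/".toList) = ['+', '-', '*', '/'] := by decide
  simp [h, List.sum_cons]
  ring
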